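-- pv_equiv track=rewrite | github.com/jwillis0720/sadie | scripts/generate_reference_yaml.py | organize_genes_by_type
-- ===== SOURCE A (Python) =====
-- from collections import defaultdict
-- from typing import Any, Dict, List, Optional, Set, Tuple
--
-- def organize_genes_by_type(genes: List[Dict[str, Any]]) -> Dict[str, Dict[str, List[str]]]:
--     """Organize genes by source and species."""
--     organized = defaultdict(lambda: defaultdict(list))
--
--     for gene in genes:
--         source = gene.get("source", "unknown")
--         species = gene.get("common", "unknown")
--         gene_name = gene.get("gene", "")
--
--         if gene_name:
--             organized[source][species].append(gene_name)
--
--     # Convert to regular dict and sort gene lists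
--     result = {}
--     for source in organized:
--         result[source] = {}
--         for species in organized[source]:
--             result[source][species] = sorted(organized[source][species])
--
--     return result
-- ===== SOURCE B (Python) =====
-- def organize_genes_by_type(genes):
--     """Organize genes by source and species."""
--     kept = [g for g in genes if g.get("gene", "")]
--     result = {}
--     for src in dict.fromkeys(g.get("source", "unknown") for g in kept):
--         grp = [g for g in kept if g.get("source", "unknown") == src]
--         result[src] = {
--             sp: sorted(g.get("gene", "") for g in grp
--                        if g.get("common", "unknown") == sp)
--             for sp in dict.fromkeys(g.get("common", "unknown") for g in grp)
--         }
--     return result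
-- ===== Notes on version B (the rewrite author's own statement) =====
-- stated objective: alternative
-- what changed: Replaces A's nested-defaultdict accumulation plus a separate dict-rebuilding/sorting pass with a filter-dedup-comprehension decomposition: keep genes with a non-empty name, iterate the first-occurrence-deduplicated sources, and build each species dict directly by filtering and sorting comprehensions.
import Mathlib
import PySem

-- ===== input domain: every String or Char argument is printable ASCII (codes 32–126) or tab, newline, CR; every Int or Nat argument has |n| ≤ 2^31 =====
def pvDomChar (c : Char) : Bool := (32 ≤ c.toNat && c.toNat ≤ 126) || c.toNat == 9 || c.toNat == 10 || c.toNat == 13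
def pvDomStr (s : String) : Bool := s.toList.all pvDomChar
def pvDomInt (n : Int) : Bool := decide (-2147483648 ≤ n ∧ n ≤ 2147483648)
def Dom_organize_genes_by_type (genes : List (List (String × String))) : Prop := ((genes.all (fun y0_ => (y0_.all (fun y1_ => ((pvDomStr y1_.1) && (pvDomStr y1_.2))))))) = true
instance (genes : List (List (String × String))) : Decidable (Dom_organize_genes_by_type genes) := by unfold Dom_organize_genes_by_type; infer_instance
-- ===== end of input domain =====

-- B replaces A's nested-defaultdict accumulation + separate rebuild/sort pass by a
-- filter/ordered-dedup/comprehension decomposition (alternative, not faster).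

-- ===== PORT A =====
-- A: one pass filling organized[source][species] (nested defaultdict; the indexed
-- append is exactly nested Dict.modify), then a conversion pass rebuilding plain
-- dicts with each gene list sorted.
def organize_genes_by_type (genes : List (List (String × String))) : List (String × List (String × List String)) :=
  let organized : PySem.Dict String (PySem.Dict String (List String)) :=
    genes.foldl (fun org gene =>
      let source := (PySem.Dict.mk gene).getD "source" "unknown"
      let species := (PySem.Dict.mk gene).getD "common" "unknown"
      let gene_name := (PySem.Dict.mk gene).getD "gene" ""
      if gene_name ≠ "" then
        org.modify source PySem.Dict.empty (fun inner => inner.modify species [] (fun l => l ++ [gene_name]))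
      else org) PySem.Dict.empty
  let result : PySem.Dict String (PySem.Dict String (List String)) :=
    organized.items.foldl (fun res p =>
      res.insert p.1 (p.2.items.foldl (fun r q => r.insert q.1 (PySem.List.sorted q.2 (fun x => x) false)) PySem.Dict.empty)) PySem.Dict.empty
  result.items.map (fun p => (p.1, p.2.items))

-- ===== PORT B =====
-- B: filter to non-empty names; iterate dict.fromkeys (= PySem.List.dedup) of the
-- sources; result[src] assignments are inserts at distinct fresh keys, i.e. a map,
-- and likewise the inner dict comprehension over the deduped species.
def organize_genes_by_type_alt (genes : List (List (String × String))) : List (String × List (String × List String)) :=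
  let kept := genes.filter (fun g => decide ((PySem.Dict.mk g).getD "gene" "" ≠ ""))
  let sources := PySem.List.dedup (kept.map (fun g => (PySem.Dict.mk g).getD "source" "unknown"))
  sources.map (fun src =>
    let grp := kept.filter (fun g => (PySem.Dict.mk g).getD "source" "unknown" == src)
    (src, (PySem.List.dedup (grp.map (fun g => (PySem.Dict.mk g).getD "common" "unknown"))).map (fun sp =>
      (sp, PySem.List.sorted ((grp.filter (fun g => (PySem.Dict.mk g).getD "common" "unknown" == sp)).map (fun g => (PySem.Dict.mk g).getD "gene" "")) (fun x => x) false))))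

-- ===== PRECONDITION & SPEC =====
def Spec_organize_genes_by_type (genes : List (List (String × String))) (out : List (String × List (String × List String))) : Prop := out = organize_genes_by_type_alt genes
instance (genes : List (List (String × String))) (out : List (String × List (String × List String))) : Decidable (Spec_organize_genes_by_type genes out) := by unfold Spec_organize_genes_by_type; infer_instance

-- ===== CLAIM (what is proved, stated in full; the proofs are below) =====
def Claim_equal_organize_genes_by_type : Prop := ∀ (genes : List (List (String × String))), Dom_organize_genes_by_type genes → Spec_organize_genes_by_type genes (organize_genes_by_type genes)

-- ===== LEMMAS AND PROOFS =====

theorem getD_foldl_modify_key {κ ν β : Type} [BEq κ] [LawfulBEq κ] [DecidableEq κ]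
    (l : List β) (key : β → κ) (f : β → ν → ν) (d0 : ν) (c : κ) (d : PySem.Dict κ ν) :
    (l.foldl (fun d a => d.modify (key a) d0 (f a)) d).getD c d0
      = (l.filter (fun a => key a == c)).foldl (fun v a => f a v) (d.getD c d0) := by
  induction l generalizing d with
  | nil => rfl
  | cons a t ih =>
    simp only [List.foldl_cons, List.filter_cons]
    by_cases h : key a = c
    · simp [h, ih]
    · simp [ih, PySem.Dict.getD_modify, if_neg (Ne.symm h), h]

theorem port_a_eq_port_b (genes : List (List (String × String))) :
    organize_genes_by_type genes = organize_genes_by_type_alt genes := by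
  unfold organize_genes_by_type organize_genes_by_type_alt
  show (List.map _ (PySem.Dict.items _))= _
  -- A's accumulation loop = the same loop over the kept genes only
  rw [show (genes.foldl (fun org gene =>
      if (PySem.Dict.mk gene).getD "gene" "" ≠ "" then
        org.modify ((PySem.Dict.mk gene).getD "source" "unknown") PySem.Dict.empty
          (fun inner => inner.modify ((PySem.Dict.mk gene).getD "common" "unknown") []
            (fun l => l ++ [(PySem.Dict.mk gene).getD "gene" ""]))
      else org) PySem.Dict.empty)
    = ((genes.filter (fun g => decide ((PySem.Dict.mk g).getD "gene" "" ≠ ""))).foldl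
        (fun org g => org.modify ((PySem.Dict.mk g).getD "source" "unknown") PySem.Dict.empty
          (fun inner => inner.modify ((PySem.Dict.mk g).getD "common" "unknown") []
            (fun l => l ++ [(PySem.Dict.mk g).getD "gene" ""]))) PySem.Dict.empty) from by
    rw [List.foldl_filter]; simp only [decide_eq_true_eq]]
  set kept := genes.filter (fun g => decide ((PySem.Dict.mk g).getD "gene" "" ≠ "")) with hkept
  set d := kept.foldl
        (fun org g => org.modify ((PySem.Dict.mk g).getD "source" "unknown") PySem.Dict.empty
          (fun inner => inner.modify ((PySem.Dict.mk g).getD "common" "unknown") []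
            (fun l => l ++ [(PySem.Dict.mk g).getD "gene" ""]))) PySem.Dict.empty with hd
  have hnd : d.keys.Nodup := by
    rw [hd]
    have := PySem.Dict.nodup_keys_foldl_modify_key kept
      (fun g => (PySem.Dict.mk g).getD "source" "unknown") (PySem.Dict.empty)
      (fun _ g => (fun inner => inner.modify ((PySem.Dict.mk g).getD "common" "unknown") []
        (fun l => l ++ [(PySem.Dict.mk g).getD "gene" ""]))) PySem.Dict.empty
    simpa using this
  have hkeys : d.keys = PySem.Set.ofList (kept.map (fun g => (PySem.Dict.mk g).getD "source" "unknown")) := by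
    rw [hd]
    have := PySem.Dict.keys_foldl_modify_key kept
      (fun g => (PySem.Dict.mk g).getD "source" "unknown") (PySem.Dict.empty)
      (fun _ g => (fun inner => inner.modify ((PySem.Dict.mk g).getD "common" "unknown") []
        (fun l => l ++ [(PySem.Dict.mk g).getD "gene" ""]))) PySem.Dict.empty
    simpa [PySem.Set.update_nil_left] using this
  -- the conversion loop over d.items appends fresh keys
  have hconv : (d.items.foldl (fun res p =>
      res.insert p.1 (p.2.items.foldl (fun r q => r.insert q.1 (PySem.List.sorted q.2 (fun x => x) false)) PySem.Dict.empty)) PySem.Dict.empty).items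
      = d.items.map (fun p => (p.1, (p.2.items.foldl (fun r q => r.insert q.1 (PySem.List.sorted q.2 (fun x => x) false)) PySem.Dict.empty))) := by
    have := PySem.Dict.items_foldl_insert_fresh d.items Prod.fst
      (fun p => (p.2.items.foldl (fun r q => r.insert q.1 (PySem.List.sorted q.2 (fun x => x) false)) PySem.Dict.empty))
      PySem.Dict.empty (by simp) (by simpa [PySem.Dict.keys] using hnd)
    simpa using this
  rw [hconv, List.map_map]
  rw [PySem.Dict.items_eq_map_keys d hnd PySem.Dict.empty, List.map_map, hkeys]
  have hgetD : ∀ s : String, d.getD s PySem.Dict.empty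
      = (kept.filter (fun g => (PySem.Dict.mk g).getD "source" "unknown" == s)).foldl
          (fun v g => v.modify ((PySem.Dict.mk g).getD "common" "unknown") []
            (fun l => l ++ [(PySem.Dict.mk g).getD "gene" ""])) PySem.Dict.empty := by
    intro s
    rw [hd]
    have := getD_foldl_modify_key kept
      (fun g => (PySem.Dict.mk g).getD "source" "unknown")
      (fun g => (fun inner => inner.modify ((PySem.Dict.mk g).getD "common" "unknown") []
        (fun l => l ++ [(PySem.Dict.mk g).getD "gene" ""])))
      (PySem.Dict.empty) s PySem.Dict.empty
    simpa using this
  -- the species-level dict built from any group, converted with sorting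
  have hinner : ∀ (grp : List (List (String × String))),
      ((grp.foldl (fun v g => v.modify ((PySem.Dict.mk g).getD "common" "unknown") []
          (fun l => l ++ [(PySem.Dict.mk g).getD "gene" ""])) PySem.Dict.empty).items.foldl
        (fun r q => r.insert q.1 (PySem.List.sorted q.2 (fun x => x) false)) PySem.Dict.empty).items
      = (PySem.Set.ofList (grp.map (fun g => (PySem.Dict.mk g).getD "common" "unknown"))).map
          (fun sp => (sp, PySem.List.sorted
            ((grp.filter (fun g => (PySem.Dict.mk g).getD "common" "unknown" == sp)).map
              (fun g => (PySem.Dict.mk g).getD "gene" "")) (fun x => x) false)) := by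
    intro grp
    set e := grp.foldl (fun v g => v.modify ((PySem.Dict.mk g).getD "common" "unknown") []
          (fun l => l ++ [(PySem.Dict.mk g).getD "gene" ""])) PySem.Dict.empty with he
    have hend : e.keys.Nodup := by
      rw [he]
      have := PySem.Dict.nodup_keys_foldl_modify_key grp
        (fun g => (PySem.Dict.mk g).getD "common" "unknown") ([] : List String)
        (fun _ g => (fun l => l ++ [(PySem.Dict.mk g).getD "gene" ""])) PySem.Dict.empty
      simpa using this
    have hekeys : e.keys = PySem.Set.ofList (grp.map (fun g => (PySem.Dict.mk g).getD "common" "unknown")) := by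
      rw [he]
      have := PySem.Dict.keys_foldl_modify_key grp
        (fun g => (PySem.Dict.mk g).getD "common" "unknown") ([] : List String)
        (fun _ g => (fun l => l ++ [(PySem.Dict.mk g).getD "gene" ""])) PySem.Dict.empty
      simpa [PySem.Set.update_nil_left] using this
    have hegetD : ∀ sp : String, e.getD sp []
        = (grp.filter (fun g => (PySem.Dict.mk g).getD "common" "unknown" == sp)).map
            (fun g => (PySem.Dict.mk g).getD "gene" "") := by
      intro sp
      rw [he]
      have := getD_foldl_modify_key grp
        (fun g => (PySem.Dict.mk g).getD "common" "unknown")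
        (fun g => (fun l => l ++ [(PySem.Dict.mk g).getD "gene" ""]))
        ([] : List String) sp PySem.Dict.empty
      simpa only [PySem.Dict.getD_empty, PySem.List.foldl_append_singleton_eq_map, List.nil_append] using this
    have hec : (e.items.foldl (fun r q => r.insert q.1 (PySem.List.sorted q.2 (fun x => x) false)) PySem.Dict.empty).items
        = e.items.map (fun q => (q.1, PySem.List.sorted q.2 (fun x => x) false)) := by
      have := PySem.Dict.items_foldl_insert_fresh e.items Prod.fst
        (fun q => PySem.List.sorted q.2 (fun x => x) false) PySem.Dict.empty
        (by simp) (by simpa [PySem.Dict.keys] using hend)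
      simpa using this
    rw [hec, PySem.Dict.items_eq_map_keys e hend ([] : List String), List.map_map, hekeys]
    apply List.map_congr_left
    intro sp _
    simp [hegetD sp]
  show _ = List.map _ (PySem.List.dedup (List.map (fun g => (PySem.Dict.mk g).getD "source" "unknown") kept))
  refine List.map_congr_left ?_
  intro src _
  simp only [Function.comp_apply]
  rw [hgetD src]
  exact congrArg (Prod.mk src) (hinner _)

-- ===== VERDICT (by name: the statement is the Claim_ definition above) =====
theorem organize_genes_by_type_spec : Claim_equal_organize_genes_by_type := by
  intro genes _
  unfold Spec_organize_genes_by_type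
  exact port_a_eq_port_b genes
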